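-- pv_equiv track=rewrite | github.com/UTN-Victor/EjerciciosPythonMarzo | Clase 4/E25.py | llenarPat
-- ===== SOURCE A (Python) =====
-- def llenarPat(n,sim):
--     v = []
--
--     for i in range(n):
--         v.append([])
--         for j in range(n):
--             if i == j or i + j == n - 1 or i == n//2 or j == n//2:
--                 v[i] += sim
--             else:
--                 v[i] += " "
--     return v
-- ===== SOURCE B (Python) =====
-- def llenarPat(n, sim):
--     # Build an n x n grid of " " cells, overlay the two diagonals and the
--     # middle row/column with sim in O(n) passes, then flatten each row
--     # element-wise (so `+=`-style extension semantics are preserved).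
--     cells = [[" "] * n for _ in range(n)]
--     m = n // 2
--     for k in range(n):
--         cells[k][k] = sim
--         cells[k][n - 1 - k] = sim
--         cells[m][k] = sim
--         cells[k][m] = sim
--     return [[ch for cell in row for ch in cell] for row in cells]
-- ===== Notes on version B (the rewrite author's own statement) =====
-- stated objective: alternative
-- what changed: Instead of testing the diagonal/middle condition for every (i,j) cell, B builds a grid of spaces, overlays only the special positions with sim in O(n) passes, then flattens each row element-wise.
import Mathlib
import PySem

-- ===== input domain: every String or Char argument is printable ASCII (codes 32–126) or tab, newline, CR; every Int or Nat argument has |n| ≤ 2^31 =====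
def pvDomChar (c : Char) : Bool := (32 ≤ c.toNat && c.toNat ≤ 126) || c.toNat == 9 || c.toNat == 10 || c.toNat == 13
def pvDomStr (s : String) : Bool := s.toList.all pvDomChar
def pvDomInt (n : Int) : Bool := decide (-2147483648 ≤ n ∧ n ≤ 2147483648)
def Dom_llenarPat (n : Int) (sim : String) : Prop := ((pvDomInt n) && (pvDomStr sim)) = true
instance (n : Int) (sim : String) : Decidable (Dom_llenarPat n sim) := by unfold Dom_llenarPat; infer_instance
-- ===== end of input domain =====

-- B replaces A's per-cell condition test by O(n) overlay passes that write sim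
-- only at the special positions of a prebuilt grid of spaces, then flattens rows.

-- ===== PORT A =====
-- 'v[i] += s' extends row i with the characters of s, one single-char string each
def llenarPat (n : Int) (sim : String) : List (List String) :=
  (PySem.List.pyRange 0 n 1).foldl (fun v i =>
    -- v.append([]) ; then the inner loop mutates v[i] in place
    let v := v ++ [([] : List String)]
    (PySem.List.pyRange 0 n 1).foldl (fun v j =>
      v.modify i.toNat (fun row =>
        if i = j ∨ i + j = n - 1 ∨ i = PySem.Int.floordiv n 2 ∨ j = PySem.Int.floordiv n 2 then
          row ++ sim.toList.map (fun c => String.mk [c])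
        else
          row ++ [" "])) v) []

-- ===== PORT B =====
-- cells[r][c] = x
def setCell (g : List (List String)) (r c : Nat) (x : String) : List (List String) :=
  g.modify r (fun row => row.set c x)

def llenarPat_alt (n : Int) (sim : String) : List (List String) :=
  let N := n.toNat
  let cells := List.replicate N (List.replicate N " ")
  let m := (PySem.Int.floordiv n 2).toNat
  let cells := (List.range N).foldl (fun g k =>
    setCell (setCell (setCell (setCell g k k sim) k (N - 1 - k) sim) m k sim) k m sim) cells
  cells.map (fun row => row.flatMap (fun cell => cell.toList.map (fun c => String.mk [c])))

-- ===== PRECONDITION & SPEC =====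
def Spec_llenarPat (n : Int) (sim : String) (out : List (List String)) : Prop := out = llenarPat_alt n sim
instance (n : Int) (sim : String) (out : List (List String)) : Decidable (Spec_llenarPat n sim out) := by unfold Spec_llenarPat; infer_instance

-- ===== CLAIM (what is proved, stated in full; the proofs are below) =====
def Claim_equal_llenarPat : Prop := ∀ (n : Int) (sim : String), Dom_llenarPat n sim → Spec_llenarPat n sim (llenarPat n sim)

-- ===== LEMMAS AND PROOFS =====

-- characters of a string as single-character strings
def pvChars (s : String) : List String := s.toList.map (fun c => String.mk [c])

-- the N×N grid whose (i,j) cell is f i j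
def gridOf (N : Nat) (f : Nat → Nat → String) : List (List String) :=
  (List.range N).map (fun i => (List.range N).map (f i))

-- A's cell contribution for indices (i, j)
def cellA (n : Int) (sim : String) (i j : Int) : List String :=
  if i = j ∨ i + j = n - 1 ∨ i = PySem.Int.floordiv n 2 ∨ j = PySem.Int.floordiv n 2 then
    pvChars sim
  else [" "]

lemma ite_append (c : Prop) [Decidable c] (row X Y : List String) :
    (if c then row ++ X else row ++ Y) = row ++ (if c then X else Y) := by
  split <;> rfl

lemma flatMap_congr_mem {α β : Type} (l : List α) {f g : α → List β}
    (h : ∀ x ∈ l, f x = g x) : l.flatMap f = l.flatMap g := by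
  induction l with
  | nil => rfl
  | cons a t ih =>
      simp only [List.flatMap_cons, h a (List.mem_cons_self), ih (fun x hx => h x (List.mem_cons_of_mem a hx))]

-- repeated 'v[k] += g j' equals one extension by the concatenation
lemma foldl_modify_append {α : Type} (l : List α) (k : Nat) (g : α → List String)
    (v : List (List String)) :
    l.foldl (fun v j => v.modify k (fun row => row ++ g j)) v
      = v.modify k (fun row => row ++ l.flatMap g) := by
  induction l generalizing v with
  | nil =>
      apply List.ext_getElem
      · simp
      · intro i h1 h2
        simp [List.getElem_modify]
  | cons a t ih =>
      simp only [List.foldl_cons, ih, List.modify_modify_eq]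
      congr 1
      funext row
      simp [Function.comp, List.append_assoc]

lemma modify_append_last (v : List (List String)) (x : List String)
    (f : List String → List String) :
    (v ++ [x]).modify v.length f = v ++ [f x] := by
  apply List.ext_getElem
  · simp
  · intro i h1 h2
    simp only [List.getElem_modify]
    by_cases hi : v.length = i
    · subst hi; simp
    · have hi' : i < v.length := by simp [List.length_modify] at h1; omega
      simp [List.getElem_append_left hi', hi]

lemma pyRange_zero_cast (n : Int) :
    PySem.List.pyRange 0 n 1 = (List.range n.toNat).map (fun k : Nat => (k : Int)) := by
  rw [PySem.List.pyRange_one]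
  simp only [Int.sub_zero]
  exact List.map_congr_left (fun k _ => by simp)

-- the outer loop: append an empty row, then extend row i by F i
lemma outer_foldl (F : Int → List String) :
    ∀ (cnt s : Nat) (v : List (List String)), v.length = s →
      (((List.range' s cnt).map (fun k : Nat => (k : Int))).foldl
        (fun v i => (v ++ [([] : List String)]).modify i.toNat (fun row => row ++ F i)) v)
      = v ++ (List.range' s cnt).map (fun k : Nat => F (k : Int)) := by
  intro cnt
  induction cnt with
  | zero => intro s v hv; simp
  | succ c ih =>
      intro s v hv
      rw [List.range'_succ]
      simp only [List.map_cons, List.foldl_cons]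
      have h1 : ((s : Nat) : Int).toNat = v.length := by simp [hv]
      rw [h1, modify_append_last, List.nil_append]
      rw [ih (s + 1) (v ++ [F (s : Int)]) (by simp [hv])]
      simp

-- A computes the row-major grid of cellA contributions
lemma llenarPat_eq (n : Int) (sim : String) :
    llenarPat n sim
      = (List.range n.toNat).map (fun i : Nat =>
          (List.range n.toNat).flatMap (fun j : Nat => cellA n sim (i : Int) (j : Int))) := by
  unfold llenarPat
  simp only [ite_append, foldl_modify_append]
  rw [pyRange_zero_cast, List.range_eq_range']
  have key := outer_foldl
      (fun i : Int => ((List.range' 0 n.toNat).map (fun k : Nat => (k : Int))).flatMap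
        (fun j => if i = j ∨ i + j = n - 1 ∨ i = PySem.Int.floordiv n 2 ∨
            j = PySem.Int.floordiv n 2 then
            sim.toList.map (fun c => String.mk [c]) else [" "]))
      n.toNat 0 [] rfl
  refine key.trans ?_
  rw [List.nil_append]
  apply List.map_congr_left
  intro k _
  simp only [List.flatMap_map, cellA, pvChars]

-- the overlay cell value after the first t passes
def Fb (N m : Nat) (sim : String) (t : Nat) (i j : Nat) : String :=
  if ((i = j ∨ i + j = N - 1) ∧ i < t) ∨ (i = m ∧ j < t) ∨ (j = m ∧ i < t) then sim else " "

lemma pvChars_space : pvChars " " = [" "] := by decide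

lemma gridOf_congr (N : Nat) (f g : Nat → Nat → String)
    (h : ∀ i < N, ∀ j < N, f i j = g i j) : gridOf N f = gridOf N g := by
  unfold gridOf
  apply List.map_congr_left
  intro i hi
  apply List.map_congr_left
  intro j hj
  exact h i (List.mem_range.mp hi) j (List.mem_range.mp hj)

lemma setCell_gridOf (N : Nat) (f : Nat → Nat → String) (r c : Nat) (x : String)
    (_hr : r < N) (_hc : c < N) :
    setCell (gridOf N f) r c x
      = gridOf N (fun i j => if i = r ∧ j = c then x else f i j) := by
  unfold setCell gridOf
  apply List.ext_getElem
  · simp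
  intro i h1 h2
  have hi : i < N := by simpa using h2
  simp only [List.getElem_modify, List.getElem_map, List.getElem_range]
  by_cases hir : r = i
  · subst hir
    simp only
    apply List.ext_getElem
    · simp
    intro j _ hj2
    have hjN : j < N := by simpa using hj2
    simp only [List.getElem_map, List.getElem_range]
    by_cases hcj : c = j
    · subst hcj; simp
    · simp [hcj]
      intro h
      exact absurd h.symm hcj
  · rw [if_neg hir]
    apply List.map_congr_left
    intro j _
    rw [if_neg (by tauto)]

lemma gridOf_Fb_zero (N m : Nat) (sim : String) :
    gridOf N (Fb N m sim 0) = List.replicate N (List.replicate N " ") := by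
  unfold gridOf Fb
  simp [List.map_const']

lemma overlay_foldl (N m : Nat) (sim : String) (hm : m < N) :
    ∀ (cnt s : Nat), s + cnt = N →
      (List.range' s cnt).foldl
        (fun g k =>
          setCell (setCell (setCell (setCell g k k sim) k (N - 1 - k) sim) m k sim) k m sim)
        (gridOf N (Fb N m sim s))
      = gridOf N (Fb N m sim N) := by
  intro cnt
  induction cnt with
  | zero =>
      intro s hs
      have : s = N := by omega
      subst this
      simp
  | succ c ih =>
      intro s hs
      rw [List.range'_succ, List.foldl_cons]
      have hsN : s < N := by omega
      rw [setCell_gridOf _ _ _ _ _ hsN hsN,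
          setCell_gridOf _ _ _ _ _ hsN (by omega),
          setCell_gridOf _ _ _ _ _ hm hsN,
          setCell_gridOf _ _ _ _ _ hsN hm]
      have hstep :
          gridOf N (fun i j => if i = s ∧ j = m then sim else
            if i = m ∧ j = s then sim else
            if i = s ∧ j = N - 1 - s then sim else
            if i = s ∧ j = s then sim else Fb N m sim s i j)
          = gridOf N (Fb N m sim (s + 1)) := by
        apply gridOf_congr
        intro i hi j hj
        unfold Fb
        split_ifs <;> first | rfl | (exfalso; omega)
      rw [hstep]
      exact ih (s + 1) (by omega)

-- B computes the flattened overlay grid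
lemma llenarPat_alt_eq (n : Int) (sim : String) :
    llenarPat_alt n sim
      = (gridOf n.toNat (Fb n.toNat (PySem.Int.floordiv n 2).toNat sim n.toNat)).map
          (fun row => row.flatMap pvChars) := by
  by_cases hN : n.toNat = 0
  · simp [llenarPat_alt, hN, gridOf]
  · have hn0 : 0 < n := by omega
    have hfd : PySem.Int.floordiv n 2 = n / 2 :=
      PySem.Int.floordiv_eq_ediv_of_pos (by norm_num)
    have hm : (PySem.Int.floordiv n 2).toNat < n.toNat := by rw [hfd]; omega
    have h0 : llenarPat_alt n sim
        = ((List.range n.toNat).foldl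
            (fun g k => setCell (setCell (setCell (setCell g k k sim) k (n.toNat - 1 - k) sim)
              ((PySem.Int.floordiv n 2).toNat) k sim) k ((PySem.Int.floordiv n 2).toNat) sim)
            (List.replicate n.toNat (List.replicate n.toNat " "))).map
            (fun row => row.flatMap (fun cell => cell.toList.map (fun c => String.mk [c]))) := rfl
    rw [h0, ← gridOf_Fb_zero n.toNat (PySem.Int.floordiv n 2).toNat sim,
        List.range_eq_range',
        overlay_foldl n.toNat (PySem.Int.floordiv n 2).toNat sim hm n.toNat 0 (by omega)]
    rfl

theorem llenarPat_spec : Claim_equal_llenarPat := by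
  intro n sim _
  unfold Spec_llenarPat
  rw [llenarPat_eq, llenarPat_alt_eq]
  unfold gridOf
  rw [List.map_map]
  apply List.map_congr_left
  intro i hi
  have hi' : i < n.toNat := List.mem_range.mp hi
  have hn0 : 0 < n := by omega
  have hfd : PySem.Int.floordiv n 2 = n / 2 :=
    PySem.Int.floordiv_eq_ediv_of_pos (by norm_num)
  simp only [Function.comp_apply, List.flatMap_map]
  apply flatMap_congr_mem
  intro j hj
  have hj' : j < n.toNat := List.mem_range.mp hj
  unfold cellA Fb
  rw [apply_ite pvChars, pvChars_space, hfd]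
  have hcond : ((i : Int) = (j : Int) ∨ (i : Int) + (j : Int) = n - 1 ∨
      (i : Int) = n / 2 ∨ (j : Int) = n / 2)
      ↔ (((i = j ∨ i + j = n.toNat - 1) ∧ i < n.toNat) ∨
         ((i = (n / 2).toNat ∧ j < n.toNat) ∨ (j = (n / 2).toNat ∧ i < n.toNat))) := by
    omega
  simp only [hcond]
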